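-- pv_equiv track=rewrite | github.com/tuanx18/my_leetcode_completion | 2916_subarrays_sum_sqr.py | sumCounts
-- ===== SOURCE A (Python) =====
-- def sumCounts(nums):
--     """
--     :type nums: List[int]
--     :rtype: int
--     """
--     MOD = 10 ** 9 + 7
--     n = len(nums)
--     ans = 0
--
--     for i in range(n):
--         freq = {}
--         distinct = 0
--
--         for j in range(i, n):
--             val = nums[j]
--             if val not in freq:
--                 freq[val] = 1
--                 distinct += 1
--             else:
--                 freq[val] += 1
--             ans += distinct * distinct
--     return ans % MOD
-- ===== SOURCE B (Python) =====
-- def sumCounts(nums):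
--     """Right-endpoint sweep: maintain d[i] = number of distinct values in
--     nums[i..j]; extending j increments d[i] exactly for i past the previous
--     occurrence of nums[j]; accumulate sum of squares of d each step."""
--     MOD = 10 ** 9 + 7
--     last = {}
--     d = []
--     ans = 0
--     for j, val in enumerate(nums):
--         p = last.get(val, -1)
--         last[val] = j
--         d.append(0)
--         d = [x + 1 if p < i else x for i, x in enumerate(d)]
--         ans += sum(x * x for x in d)
--     return ans % MOD
-- ===== Notes on version B (the rewrite author's own statement) =====
-- stated objective: alternative
-- what changed: Replaces A's per-start-index rescan with a fresh dictionary by a single right-endpoint sweep that maintains the array of distinct counts for every left endpoint (updated from each element's previous occurrence) and accumulates the sum of its squares.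
import Mathlib
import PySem

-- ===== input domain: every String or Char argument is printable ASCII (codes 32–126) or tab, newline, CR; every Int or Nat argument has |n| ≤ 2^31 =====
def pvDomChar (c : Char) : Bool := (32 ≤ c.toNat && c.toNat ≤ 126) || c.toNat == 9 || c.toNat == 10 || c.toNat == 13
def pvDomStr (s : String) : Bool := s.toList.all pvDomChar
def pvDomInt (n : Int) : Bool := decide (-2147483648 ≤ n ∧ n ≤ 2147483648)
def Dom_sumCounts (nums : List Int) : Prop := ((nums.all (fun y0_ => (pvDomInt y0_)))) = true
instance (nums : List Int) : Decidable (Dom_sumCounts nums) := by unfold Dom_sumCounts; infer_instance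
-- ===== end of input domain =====

-- B replaces A's restart-a-dictionary-per-left-endpoint double scan by one right-endpoint
-- sweep maintaining the distinct-count array for all left endpoints (objective: alternative).

-- ===== PORT A =====
def sumCounts (nums : List Int) : Int :=
  let MOD : Int := 10 ^ 9 + 7
  let n : Int := nums.length
  let ans : Int := 0
  let ans := (PySem.List.pyRange 0 n 1).foldl (fun ans i =>
    ((PySem.List.pyRange i n 1).foldl (fun (st : PySem.Dict Int Int × Int × Int) j =>
        let freq := st.1; let distinct := st.2.1; let ans := st.2.2
        let val := PySem.List.pyGetD nums j 0   -- j ∈ [i,n): index always in range, no IndexError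
        if (freq.get? val).isNone then
          (freq.insert val 1, distinct + 1, ans + (distinct + 1) * (distinct + 1))
        else
          (freq.insert val (freq.getD val 0 + 1), distinct, ans + distinct * distinct))
      (PySem.Dict.empty, 0, ans)).2.2) ans
  PySem.Int.mod ans MOD

-- ===== PORT B =====
def sumCounts_alt (nums : List Int) : Int :=
  let MOD : Int := 10 ^ 9 + 7
  let fin :=
    (PySem.List.enumerate nums).foldl (fun (st : PySem.Dict Int Int × List Int × Int) jv =>
      let last := st.1; let d := st.2.1; let ans := st.2.2
      let j := jv.1; let val := jv.2
      let p := last.getD val (-1)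
      let last := last.insert val j
      let d := d ++ [0]
      let d := (PySem.List.enumerate d).map (fun ix => if p < ix.1 then ix.2 + 1 else ix.2)
      (last, d, ans + d.foldl (fun a x => a + x * x) 0))
      (PySem.Dict.empty, [], 0)
  PySem.Int.mod fin.2.2 MOD

-- ===== PRECONDITION & SPEC =====
def Spec_sumCounts (nums : List Int) (out : Int) : Prop := out = sumCounts_alt nums
instance (nums : List Int) (out : Int) : Decidable (Spec_sumCounts nums out) := by unfold Spec_sumCounts; infer_instance

-- ===== CLAIM (what is proved, stated in full; the proofs are below) =====
def Claim_equal_sumCounts : Prop := ∀ (nums : List Int), Dom_sumCounts nums → Spec_sumCounts nums (sumCounts nums)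

-- ===== LEMMAS AND PROOFS =====

-- number of distinct values of a list
def dC (l : List Int) : Int := ((l.toFinset.card : Nat) : Int)

-- index of the last occurrence of v in l, or -1
def lastIdx (v : Int) : List Int → Int
  | [] => -1
  | x :: xs => if v ∈ xs then lastIdx v xs + 1 else if x = v then 0 else -1

-- A's inner loop, factored out (definitionally the lambda in the port)
def A_inner (nums : List Int) (i b : Int) (ans0 : Int) : PySem.Dict Int Int × Int × Int :=
  (PySem.List.pyRange i b 1).foldl (fun (st : PySem.Dict Int Int × Int × Int) j =>
      let freq := st.1; let distinct := st.2.1; let ans := st.2.2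
      let val := PySem.List.pyGetD nums j 0
      if (freq.get? val).isNone then
        (freq.insert val 1, distinct + 1, ans + (distinct + 1) * (distinct + 1))
      else
        (freq.insert val (freq.getD val 0 + 1), distinct, ans + distinct * distinct))
    (PySem.Dict.empty, 0, ans0)

-- B's loop body, factored out (definitionally the lambda in the port)
def B_step (st : PySem.Dict Int Int × List Int × Int) (jv : Int × Int) :
    PySem.Dict Int Int × List Int × Int :=
  let last := st.1; let d := st.2.1; let ans := st.2.2
  let j := jv.1; let val := jv.2
  let p := last.getD val (-1)
  let last := last.insert val j
  let d := d ++ [0]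
  let d := (PySem.List.enumerate d).map (fun ix => if p < ix.1 then ix.2 + 1 else ix.2)
  (last, d, ans + d.foldl (fun a x => a + x * x) 0)

theorem dC_append_mem {l : List Int} {x : Int} (h : x ∈ l) : dC (l ++ [x]) = dC l := by
  have : (l ++ [x]).toFinset = l.toFinset := by
    simp [List.toFinset_append,
      Finset.insert_eq_self.mpr (List.mem_toFinset.mpr h)]
  simp [dC, this]

theorem dC_append_not_mem {l : List Int} {x : Int} (h : x ∉ l) : dC (l ++ [x]) = dC l + 1 := by
  have : (l ++ [x]).toFinset = insert x l.toFinset := by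
    simp [List.toFinset_append]
  rw [dC, dC, this, Finset.card_insert_of_notMem (fun hx => h (List.mem_toFinset.mp hx))]
  push_cast; ring

theorem lastIdx_lt_length (v : Int) (l : List Int) : lastIdx v l < l.length := by
  induction l with
  | nil => simp [lastIdx]
  | cons x xs ih =>
    simp only [lastIdx, List.length_cons]
    split_ifs <;> push_cast <;> omega

theorem le_lastIdx_iff (v : Int) (l : List Int) (i : ℕ) :
    (i : Int) ≤ lastIdx v l ↔ v ∈ l.drop i := by
  induction l generalizing i with
  | nil => simp [lastIdx]; omega
  | cons x xs ih =>
    cases i with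
    | zero =>
      simp only [lastIdx, Nat.cast_zero, List.drop_zero, List.mem_cons]
      by_cases h1 : v ∈ xs
      · have h0 : (0 : Int) ≤ lastIdx v xs := (ih 0).mpr (by simpa using h1)
        simp [h1]
        omega
      · by_cases h2 : x = v
        · simp [h1, h2]
        · have hvx : ¬ v = x := fun h => h2 h.symm
          simp [h1, h2, hvx]
    | succ k =>
      simp only [lastIdx, List.drop_succ_cons]
      by_cases h1 : v ∈ xs
      · rw [if_pos h1, ← ih k]; push_cast; omega
      · have hnd : v ∉ xs.drop k := fun hm => h1 (List.mem_of_mem_drop hm)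
        have h2 : ¬ (((k + 1 : ℕ) : Int) ≤ (if x = v then (0 : Int) else -1)) := by
          split_ifs <;> push_cast <;> omega
        rw [if_neg h1]
        constructor
        · intro hle; exact absurd hle h2
        · intro hm; exact absurd hm hnd

theorem lastIdx_append (v x : Int) (l : List Int) :
    lastIdx v (l ++ [x]) = if x = v then (l.length : Int) else lastIdx v l := by
  induction l with
  | nil => simp [lastIdx]
  | cons y ys ih =>
    by_cases hx : x = v
    · have hm : v ∈ ys ++ [x] := by simp [hx]
      simp only [List.cons_append, lastIdx, hm, if_true, ih, if_pos hx, List.length_cons]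
      push_cast; ring
    · have hvx : v ∉ [x] := by simp; exact fun h => hx h.symm
      have hmem : (v ∈ ys ++ [x]) ↔ v ∈ ys := by simp at hvx ⊢; tauto
      simp only [List.cons_append, lastIdx, ih, if_neg hx]
      by_cases h1 : v ∈ ys
      · simp [hmem, h1]
      · simp [hmem, h1]

theorem A_inner_spec (nums : List Int) (i : ℕ) (ans0 : Int) :
    ∀ k : ℕ, i ≤ k → k ≤ nums.length →
    ∃ freq, A_inner nums (i : Int) (k : Int) ans0
      = (freq, dC ((nums.take k).drop i),
          ans0 + ∑ j ∈ Finset.Ico i k, (dC ((nums.take (j+1)).drop i)) * (dC ((nums.take (j+1)).drop i)))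
      ∧ ∀ v, (freq.get? v).isSome = decide (v ∈ (nums.take k).drop i) := by
  intro k hik
  induction k, hik using Nat.le_induction with
  | base =>
    intro hk
    refine ⟨PySem.Dict.empty, ?_, ?_⟩
    · have hseg : (nums.take i).drop i = [] :=
        List.drop_eq_nil_of_le (by simp [List.length_take])
      rw [A_inner, PySem.List.pyRange_one_eq_nil (le_refl _)]
      simp [hseg, dC]
    · intro v
      have hseg : (nums.take i).drop i = [] :=
        List.drop_eq_nil_of_le (by simp [List.length_take])
      simp [hseg, PySem.Dict.get?_empty]
  | succ k hik ih =>
    intro hk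
    have hlt : k < nums.length := hk
    have hk' : k ≤ nums.length := Nat.le_of_succ_le hk
    obtain ⟨freq, heq, hinv⟩ := ih hk'
    have hr : PySem.List.pyRange (i : Int) ((k : Int) + 1) 1
        = PySem.List.pyRange (i : Int) (k : Int) 1 ++ [(k : Int)] :=
      PySem.List.pyRange_one_succ_right (by exact_mod_cast hik)
    have hval : PySem.List.pyGetD nums ((k : Nat) : Int) 0 = nums[k] := by
      simp [PySem.List.pyGetD_natCast, List.getD_eq_getElem?_getD, List.getElem?_eq_getElem hlt]
    have htake : nums.take (k+1) = nums.take k ++ [nums[k]] := by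
      rw [List.take_add_one]; simp [List.getElem?_eq_getElem hlt]
    have hseg : (nums.take (k+1)).drop i = (nums.take k).drop i ++ [nums[k]] := by
      rw [htake, List.drop_append_of_le_length (by simp [List.length_take]; omega)]
    have hsum : ans0 + ∑ j ∈ Finset.Ico i (k+1),
          (dC ((nums.take (j+1)).drop i)) * (dC ((nums.take (j+1)).drop i))
        = ans0 + (∑ j ∈ Finset.Ico i k,
          (dC ((nums.take (j+1)).drop i)) * (dC ((nums.take (j+1)).drop i)))
          + (dC ((nums.take (k+1)).drop i)) * (dC ((nums.take (k+1)).drop i)) := by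
      rw [Finset.sum_Ico_succ_top hik]; ring
    rw [A_inner] at heq
    unfold A_inner
    push_cast
    rw [hr, List.foldl_append, heq]
    simp only [List.foldl_cons, List.foldl_nil, hval]
    rcases ho : freq.get? (nums[k]) with _ | c
    · -- val not seen yet: it is not in the segment
      have hnm : nums[k] ∉ (nums.take k).drop i := by
        have := hinv (nums[k]); rw [ho] at this; simpa using this.symm
      refine ⟨freq.insert (nums[k]) 1, ?_, ?_⟩
      · simp only [Option.isNone_none, if_true]
        rw [hsum, hseg, dC_append_not_mem hnm]
      · intro v
        rw [hseg]
        rcases eq_or_ne v (nums[k]) with rfl | hne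
        · simp [PySem.Dict.get?_insert_self]
        · simp [PySem.Dict.get?_insert, hne, hinv v]
    · -- val already in the segment
      have hm : nums[k] ∈ (nums.take k).drop i := by
        have := hinv (nums[k]); rw [ho] at this; simpa using this.symm
      refine ⟨freq.insert (nums[k]) (freq.getD (nums[k]) 0 + 1), ?_, ?_⟩
      · simp only [Option.isNone_some, Bool.false_eq_true, if_false]
        rw [hsum, hseg, dC_append_mem hm]
      · intro v
        rw [hseg]
        rcases eq_or_ne v (nums[k]) with rfl | hne
        · simp [PySem.Dict.get?_insert_self]
        · simp [PySem.Dict.get?_insert, hne, hinv v]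

theorem A_outer_spec (nums : List Int) :
    ∀ m : ℕ, m ≤ nums.length →
    (PySem.List.pyRange 0 (m : Int) 1).foldl
        (fun ans i => (A_inner nums i (nums.length : Int) ans).2.2) 0
      = ∑ i ∈ Finset.range m, ∑ j ∈ Finset.Ico i nums.length,
          (dC ((nums.take (j+1)).drop i)) * (dC ((nums.take (j+1)).drop i)) := by
  intro m
  induction m with
  | zero => intro _; simp [PySem.List.pyRange_one_eq_nil (le_refl (0 : Int))]
  | succ m ih =>
    intro hm
    have hm' : m ≤ nums.length := Nat.le_of_succ_le hm
    have hr : PySem.List.pyRange 0 ((m : Int) + 1) 1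
        = PySem.List.pyRange 0 (m : Int) 1 ++ [(m : Int)] :=
      PySem.List.pyRange_one_succ_right (by positivity)
    push_cast
    rw [hr, List.foldl_append, ih hm']
    obtain ⟨freq, heq, -⟩ := A_inner_spec nums m
      (∑ i ∈ Finset.range m, ∑ j ∈ Finset.Ico i nums.length,
        (dC ((nums.take (j+1)).drop i)) * (dC ((nums.take (j+1)).drop i)))
      nums.length hm' (le_refl _)
    simp only [List.foldl_cons, List.foldl_nil]
    rw [heq, Finset.sum_range_succ]

theorem foldl_sq (l : List Int) (c : Int) :
    l.foldl (fun a x => a + x * x) c = c + (l.map (fun x => x * x)).sum := by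
  induction l generalizing c with
  | nil => simp
  | cons x xs ih => simp [ih]; ring

theorem sum_map_range (k : ℕ) (h : ℕ → Int) :
    ((List.range k).map h).sum = ∑ i ∈ Finset.range k, h i := by
  induction k with
  | zero => simp
  | succ n ih => simp [List.range_succ, Finset.sum_range_succ, ih]

theorem B_spec (nums : List Int) :
    ∀ m : ℕ, m ≤ nums.length →
    ∃ last, (PySem.List.enumerate (nums.take m)).foldl B_step (PySem.Dict.empty, [], 0)
      = (last, (List.range m).map (fun i => dC ((nums.take m).drop i)),
          ∑ j ∈ Finset.range m, ∑ i ∈ Finset.range (j+1),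
            (dC ((nums.take (j+1)).drop i)) * (dC ((nums.take (j+1)).drop i)))
      ∧ ∀ v, last.getD v (-1) = lastIdx v (nums.take m) := by
  intro m
  induction m with
  | zero =>
    intro _
    refine ⟨PySem.Dict.empty, by simp [PySem.List.enumerate_nil], ?_⟩
    intro v; simp [PySem.Dict.getD_empty, lastIdx]
  | succ m ih =>
    intro hm
    have hlt : m < nums.length := hm
    have hm' : m ≤ nums.length := Nat.le_of_succ_le hm
    obtain ⟨last, heq, hinv⟩ := ih hm'
    have hlen : (nums.take m).length = m := by simp [List.length_take]; omega
    have htake : nums.take (m+1) = nums.take m ++ [nums[m]] := by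
      rw [List.take_add_one]; simp [List.getElem?_eq_getElem hlt]
    have henum : PySem.List.enumerate (nums.take (m+1))
        = PySem.List.enumerate (nums.take m) ++ [((m : Int), nums[m])] := by
      rw [htake, PySem.List.enumerate_append]
      simp [hlen, PySem.List.enumerate_cons, PySem.List.enumerate_nil]
    set p : Int := lastIdx (nums[m]) (nums.take m) with hp
    have hplt : p < (m : Int) := by
      have := lastIdx_lt_length (nums[m]) (nums.take m)
      rw [hlen] at this; exact this
    have hd : ((PySem.List.enumerate
          (((List.range m).map (fun i => dC ((nums.take m).drop i))) ++ [0])).map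
            (fun ix => if p < ix.1 then ix.2 + 1 else ix.2))
        = (List.range (m+1)).map (fun i => dC ((nums.take (m+1)).drop i)) := by
      apply List.ext_getElem
      · simp [PySem.List.length_enumerate]
      · intro t ht1 ht2
        simp only [List.getElem_map, PySem.List.getElem_enumerate, List.getElem_range]
        have ht : t < m + 1 := by
          simpa [PySem.List.length_enumerate] using ht1
        have hsegt : ∀ t' : ℕ, t' ≤ m →
            (nums.take (m+1)).drop t' = (nums.take m).drop t' ++ [nums[m]] := by
          intro t' ht'
          rw [htake, List.drop_append_of_le_length (by rw [hlen]; exact ht')]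
        rcases Nat.lt_or_ge t m with htm | htm
        · have hel : (((List.range m).map (fun i => dC ((nums.take m).drop i))) ++ [0])[t]'(by simp; omega)
              = dC ((nums.take m).drop t) := by
            rw [List.getElem_append_left (by simp; omega)]
            simp
          rw [hel, hsegt t (Nat.le_of_lt htm)]
          by_cases hpt : p < (t : Int)
          · have hnm : nums[m] ∉ (nums.take m).drop t := by
              rw [← le_lastIdx_iff, ← hp]; omega
            rw [if_pos (by simpa using hpt), dC_append_not_mem hnm]
          · have hmem : nums[m] ∈ (nums.take m).drop t := by
              rw [← le_lastIdx_iff, ← hp]; omega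
            rw [if_neg (by simpa using hpt), dC_append_mem hmem]
        · have htm' : t = m := by omega
          subst htm'
          have hel : (((List.range t).map (fun i => dC ((nums.take t).drop i))) ++ [0])[t]'(by simp) = 0 := by
            rw [List.getElem_append_right (by simp)]
            simp
          rw [hel, if_pos (by simpa using hplt)]
          have : (nums.take (t+1)).drop t = [nums[t]] := by
            rw [hsegt t (le_refl t), List.drop_eq_nil_of_le (by simp [List.length_take])]
            rfl
          rw [this]
          simp [dC]
    refine ⟨last.insert (nums[m]) (m : Int), ?_, ?_⟩
    · rw [henum, List.foldl_append, heq]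
      simp only [List.foldl_cons, List.foldl_nil, B_step]
      rw [hinv (nums[m]), ← hp, hd]
      refine congrArg _ (congrArg _ ?_)
      rw [foldl_sq, List.map_map, sum_map_range, zero_add,
        Finset.sum_range_succ (f := fun j => ∑ i ∈ Finset.range (j+1),
          (dC ((nums.take (j+1)).drop i)) * (dC ((nums.take (j+1)).drop i)))]
      congr 1
    · intro v
      rw [htake, lastIdx_append]
      rcases eq_or_ne v (nums[m]) with rfl | hne
      · rw [PySem.Dict.getD_insert]
        simp [hlen]
      · rw [PySem.Dict.getD_insert]
        have : ¬ (nums[m] = v) := fun h => hne h.symm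
        simp [hne, this, hinv v]

-- ===== VERDICT (by name: the statement is the Claim_ definition above) =====
theorem sumCounts_spec : Claim_equal_sumCounts := by
  intro nums _
  show sumCounts nums = sumCounts_alt nums
  have hA : sumCounts nums
      = PySem.Int.mod ((PySem.List.pyRange 0 (nums.length : Int) 1).foldl
          (fun ans i => (A_inner nums i (nums.length : Int) ans).2.2) 0) (10 ^ 9 + 7) := rfl
  have hB : sumCounts_alt nums
      = PySem.Int.mod (((PySem.List.enumerate nums).foldl B_step
          (PySem.Dict.empty, [], 0)).2.2) (10 ^ 9 + 7) := rfl
  obtain ⟨last, heqB, -⟩ := B_spec nums nums.length (le_refl _)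
  rw [List.take_length] at heqB
  rw [hA, hB, A_outer_spec nums nums.length (le_refl _), heqB]
  congr 1
  rw [Finset.range_eq_Ico, Finset.sum_Ico_Ico_comm]
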